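-- pv_equiv track=rewrite | github.com/svbailey/Retikon | retikon_core/capabilities.py | _validate_capabilities
-- ===== SOURCE A (Python) =====
-- from typing import Iterable
--
-- _CAPABILITY_ORDER: tuple[str, ...] = (
--     "ingestion",
--     "pipelines",
--     "query",
--     "graphar",
--     "sdk",
--     "cli",
--     "console",
--     "local_runtime",
--     "webhooks_basic",
--     "streaming_ingest",
--     "queue_dispatch",
--     "compaction",
--     "retention",
--     "event_state",
--     "webhooks_advanced",
--     "multi_tenant",
--     "metering",
--     "fleet_ops",
--     "observability",
--     "data_factory",
--     "governance",
-- )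
--
-- _KNOWN_CAPABILITIES = set(_CAPABILITY_ORDER)
--
-- def _validate_capabilities(capabilities: Iterable[str]) -> tuple[str, ...]:
--     seen = []
--     for item in capabilities:
--         if item not in _KNOWN_CAPABILITIES:
--             raise ValueError(f"Unknown capability: {item}")
--         if item not in seen:
--             seen.append(item)
--     ordered = [cap for cap in _CAPABILITY_ORDER if cap in seen]
--     return tuple(ordered)
-- ===== SOURCE B (Python) =====
-- from typing import Iterable
--
-- _CAPABILITY_ORDER: tuple[str, ...] = (
--     "ingestion",
--     "pipelines",
--     "query",
--     "graphar",
--     "sdk",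
--     "cli",
--     "console",
--     "local_runtime",
--     "webhooks_basic",
--     "streaming_ingest",
--     "queue_dispatch",
--     "compaction",
--     "retention",
--     "event_state",
--     "webhooks_advanced",
--     "multi_tenant",
--     "metering",
--     "fleet_ops",
--     "observability",
--     "data_factory",
--     "governance",
-- )
--
-- _KNOWN_CAPABILITIES = set(_CAPABILITY_ORDER)
-- _INDEX = {cap: i for i, cap in enumerate(_CAPABILITY_ORDER)}
--
-- def _validate_capabilities(capabilities: Iterable[str]) -> tuple[str, ...]:
--     present = set()
--     for item in capabilities:
--         if item not in _KNOWN_CAPABILITIES: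
--             raise ValueError(f"Unknown capability: {item}")
--         present.add(item)
--     return tuple(sorted(present, key=_INDEX.__getitem__))
-- ===== Notes on version B (the rewrite author's own statement) =====
-- stated objective: alternative
-- what changed: B collects valid items into a set during the validation pass and sorts that set by a precomputed capability->position index map, instead of A's list-membership dedup followed by filtering the whole _CAPABILITY_ORDER tuple.
import Mathlib
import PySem

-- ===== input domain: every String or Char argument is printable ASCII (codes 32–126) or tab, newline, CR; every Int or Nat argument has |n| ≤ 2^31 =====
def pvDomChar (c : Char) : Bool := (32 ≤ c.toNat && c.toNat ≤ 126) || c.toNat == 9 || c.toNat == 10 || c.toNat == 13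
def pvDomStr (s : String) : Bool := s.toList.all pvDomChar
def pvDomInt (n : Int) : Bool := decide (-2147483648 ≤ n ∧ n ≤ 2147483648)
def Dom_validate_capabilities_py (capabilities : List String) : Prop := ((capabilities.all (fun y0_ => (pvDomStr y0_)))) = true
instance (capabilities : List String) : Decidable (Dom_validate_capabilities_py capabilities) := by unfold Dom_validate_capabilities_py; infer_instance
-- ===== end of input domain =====

-- B validates into a set and sorts it by a precomputed position index, instead of A's
-- list-membership dedup followed by filtering the whole capability-order tuple (alternative decomposition).


-- ===== PORT A =====
def capabilityOrder : List String :=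
  ["ingestion", "pipelines", "query", "graphar", "sdk", "cli", "console",
   "local_runtime", "webhooks_basic", "streaming_ingest", "queue_dispatch",
   "compaction", "retention", "event_state", "webhooks_advanced", "multi_tenant",
   "metering", "fleet_ops", "observability", "data_factory", "governance"]

def knownCapabilities : PySem.Set String := PySem.Set.ofList capabilityOrder

-- the validation/dedup loop of A; an unknown item raises ValueError (excluded by Pre_),
-- modelled by stopping with the current state (unreachable under Pre_)
def validateLoopA (caps : List String) (seen : List String) : List String :=
  match caps with
  | [] => seen
  | item :: rest =>
      if PySem.Set.contains knownCapabilities item then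
        validateLoopA rest (if item ∈ seen then seen else seen ++ [item])
      else seen

def validate_capabilities_py (capabilities : List String) : List String :=
  let seen := validateLoopA capabilities []
  capabilityOrder.filter (fun cap => decide (cap ∈ seen))

-- ===== PORT B =====
def capIndex : PySem.Dict String Int :=
  (PySem.List.enumerate capabilityOrder).foldl (fun d p => d.insert p.2 p.1) (PySem.Dict.empty : PySem.Dict String Int)

-- the validation loop of B; unknown item raises ValueError (excluded by Pre_)
def validateLoopB (caps : List String) (present : PySem.Set String) : PySem.Set String :=
  match caps with
  | [] => present
  | item :: rest =>
      if PySem.Set.contains knownCapabilities item then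
        validateLoopB rest (PySem.Set.add present item)
      else present

def validate_capabilities_py_alt (capabilities : List String) : List String :=
  PySem.List.sorted (validateLoopB capabilities PySem.Set.empty)
    (fun s => capIndex.getD s 0) false

-- ===== PRECONDITION & SPEC =====
-- Pre_ excludes exactly the inputs containing an unknown capability, on which A raises ValueError.
def Pre_validate_capabilities_py (capabilities : List String) : Prop :=
  ∀ s ∈ capabilities, s ∈ capabilityOrder
instance (capabilities : List String) : Decidable (Pre_validate_capabilities_py capabilities) := by
  unfold Pre_validate_capabilities_py; infer_instance

def pvWitness_validate_capabilities_py : List String := ["cli", "sdk", "cli", "query"]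

def Spec_validate_capabilities_py (capabilities : List String) (out : List String) : Prop := out = validate_capabilities_py_alt capabilities
instance (capabilities : List String) (out : List String) : Decidable (Spec_validate_capabilities_py capabilities out) := by unfold Spec_validate_capabilities_py; infer_instance

-- ===== CLAIM (what is proved, stated in full; the proofs are below) =====
def Claim_equal_validate_capabilities_py : Prop := ∀ (capabilities : List String), Dom_validate_capabilities_py capabilities → Pre_validate_capabilities_py capabilities → Spec_validate_capabilities_py capabilities (validate_capabilities_py capabilities)

-- ===== LEMMAS AND PROOFS =====

theorem validateLoopA_eq_foldl (caps : List String) (seen : List String)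
    (h : ∀ s ∈ caps, s ∈ capabilityOrder) :
    validateLoopA caps seen = caps.foldl PySem.Set.add seen := by
  induction caps generalizing seen with
  | nil => rfl
  | cons x rest ih =>
      have hx : PySem.Set.contains knownCapabilities x = true := by
        have : x ∈ capabilityOrder := h x (List.mem_cons_self ..)
        simpa [knownCapabilities, PySem.Set.contains, PySem.Set.mem_ofList] using this
      simp only [validateLoopA, hx, if_true, List.foldl_cons]
      rw [ih _ (fun s hs => h s (List.mem_cons_of_mem _ hs))]
      congr 1
      simp [PySem.Set.add, PySem.Set.contains]

theorem validateLoopB_eq_foldl (caps : List String) (present : PySem.Set String)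
    (h : ∀ s ∈ caps, s ∈ capabilityOrder) :
    validateLoopB caps present = caps.foldl PySem.Set.add present := by
  induction caps generalizing present with
  | nil => rfl
  | cons x rest ih =>
      have hx : PySem.Set.contains knownCapabilities x = true := by
        have : x ∈ capabilityOrder := h x (List.mem_cons_self ..)
        simpa [knownCapabilities, PySem.Set.contains, PySem.Set.mem_ofList] using this
      simp only [validateLoopB, hx, if_true, List.foldl_cons]
      exact ih _ (fun s hs => h s (List.mem_cons_of_mem _ hs))

theorem order_pairwise_key :
    capabilityOrder.Pairwise (fun a b => (capIndex.getD a 0 : Int) < capIndex.getD b 0) := by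
  decide

theorem order_nodup : capabilityOrder.Nodup := by decide

theorem validate_capabilities_py_spec : Claim_equal_validate_capabilities_py := by
  intro caps _ hpre
  unfold Spec_validate_capabilities_py validate_capabilities_py validate_capabilities_py_alt
  rw [validateLoopA_eq_foldl caps [] hpre, validateLoopB_eq_foldl caps PySem.Set.empty hpre]
  have hofl : caps.foldl PySem.Set.add ([] : List String) = PySem.Set.ofList caps := by
    rw [PySem.Set.ofList_eq_foldl]
  rw [show (PySem.Set.empty : PySem.Set String) = ([] : List String) from rfl, hofl]
  set d := PySem.Set.ofList caps with hd
  have hdnodup : d.Nodup := PySem.Set.nodup_ofList caps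
  have hdsub : ∀ x ∈ d, x ∈ capabilityOrder := by
    intro x hx
    exact hpre x ((PySem.Set.mem_ofList caps x).mp hx)
  -- name the sorted order: the filtered order list is a strictly key-increasing
  -- rearrangement of d
  have hperm : (capabilityOrder.filter (fun cap => decide (cap ∈ d))).Perm d := by
    -- both are nodup lists with the same membership
    refine (List.perm_ext_iff_of_nodup (List.Nodup.filter _ order_nodup) hdnodup).mpr ?_
    intro x
    simp only [List.mem_filter, decide_eq_true_eq]
    exact ⟨fun h => h.2, fun h => ⟨hdsub x h, h⟩⟩
  have hpair : (capabilityOrder.filter (fun cap => decide (cap ∈ d))).Pairwise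
      (fun a b => (capIndex.getD a 0 : Int) < capIndex.getD b 0) :=
    List.Pairwise.filter _ order_pairwise_key
  -- name the sorted order: the filtered order list is a strictly key-increasing rearrangement of d
  exact (PySem.List.sorted_eq_of_perm_of_pairwise_lt d
    (capabilityOrder.filter (fun cap => decide (cap ∈ d)))
    (fun s => (capIndex.getD s 0 : Int)) hperm hpair).symm
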